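-- pv_equiv track=rewrite | github.com/rubrikinc/rbkcli | rbkcli/base/jsops.py | key_metadata_key
-- ===== SOURCE A (Python) =====
-- def key_metadata_key(metadata_map):
--     """Convert metadata map created to list of keys."""
--     str_key_lst = []
--     for metadata_key in metadata_map:
--         str_key = ''
--         metadata_key = metadata_key.split('[')
--         metadata_key.pop(0)
--         for key in metadata_key:
--             key = key.split('#')
--             key = key[0]
--             str_key = str_key + '[' + key + ']'
--         str_key_lst.append(str_key)
--     return str_key_lst
-- ===== SOURCE B (Python) =====
-- import re
--
-- def key_metadata_key(metadata_map):
--     """Convert metadata map created to list of keys."""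
--     return [''.join('[' + seg + ']' for seg in re.findall(r'\[([^#\[]*)', metadata_key))
--             for metadata_key in metadata_map]
-- ===== Notes on version B (the rewrite author's own statement) =====
-- stated objective: idiomatic
-- what changed: Replaced the nested split/pop/split loops and string accumulator with a single regex scan (re.findall of '[' followed by a run of non-'#'/non-'[' chars) joined per element inside a list comprehension.
import Mathlib
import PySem

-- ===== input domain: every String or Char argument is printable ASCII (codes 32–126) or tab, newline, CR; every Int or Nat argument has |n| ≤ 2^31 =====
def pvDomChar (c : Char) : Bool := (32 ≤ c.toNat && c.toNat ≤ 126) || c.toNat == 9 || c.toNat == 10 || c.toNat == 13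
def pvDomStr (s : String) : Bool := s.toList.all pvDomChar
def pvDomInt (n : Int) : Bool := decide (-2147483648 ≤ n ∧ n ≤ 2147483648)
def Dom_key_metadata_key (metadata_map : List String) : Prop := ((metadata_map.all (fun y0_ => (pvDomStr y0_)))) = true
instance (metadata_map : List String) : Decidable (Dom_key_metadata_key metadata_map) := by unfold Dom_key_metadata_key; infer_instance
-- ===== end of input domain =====

-- B replaces A's nested split/pop/split loops by a single regex-style scan per string; objective: idiomatic.

-- ===== PORT A =====
-- inner loop body: str_key = str_key + '[' + key.split('#')[0] + ']'
-- (key.split('#') is always nonempty, so the Python index [0] never raises; ported as pyGetD … 0 [])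
def pvKeyA (s : String) : String :=
  let parts := (PySem.Chars.splitOn s.toList ['[']).tail  -- metadata_key.split('['); .pop(0) (list is never empty)
  String.ofList (parts.foldl
    (fun acc key => acc ++ ('[' :: PySem.List.pyGetD (PySem.Chars.splitOn key ['#']) 0 [] ++ [']'])) [])

def key_metadata_key (metadata_map : List String) : List String :=
  metadata_map.foldl (fun acc s => acc ++ [pvKeyA s]) []

-- ===== PORT B =====
-- the regex character class [^#\[]
def pvSegP (c : Char) : Bool := !(c == '#' || c == '[')

-- re.findall(r'\[([^#\[]*)', s): scan left to right; at each '[' capture the maximal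
-- run of non-'#'/non-'[' characters that follows and resume after it
def pvFindSegs : List Char → List (List Char)
  | [] => []
  | c :: cs =>
    if c = '[' then
      let seg := cs.takeWhile pvSegP
      seg :: pvFindSegs (cs.drop seg.length)
    else
      pvFindSegs cs
termination_by l => l.length
decreasing_by all_goals (simp only [List.length_drop, List.length_cons]; omega)

def pvKeyB (s : String) : String :=
  String.ofList (((pvFindSegs s.toList).map (fun seg => '[' :: seg ++ [']'])).flatten)

def key_metadata_key_alt (metadata_map : List String) : List String :=
  metadata_map.map pvKeyB

-- ===== PRECONDITION & SPEC =====
def Spec_key_metadata_key (metadata_map : List String) (out : List String) : Prop := out = key_metadata_key_alt metadata_map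
instance (metadata_map : List String) (out : List String) : Decidable (Spec_key_metadata_key metadata_map out) := by unfold Spec_key_metadata_key; infer_instance

-- ===== CLAIM (what is proved, stated in full; the proofs are below) =====
def Claim_equal_key_metadata_key : Prop := ∀ (metadata_map : List String), Dom_key_metadata_key metadata_map → Spec_key_metadata_key metadata_map (key_metadata_key metadata_map)

-- ===== LEMMAS AND PROOFS =====

-- reference single-character splitter, used to reason about PySem.Chars.splitOn with a one-char separator
def pvSplitC (c : Char) : List Char → List (List Char)
  | [] => [[]]
  | x :: xs => if x = c then [] :: pvSplitC c xs else (pvSplitC c xs).modifyHead (x :: ·)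

theorem pvSplitC_ne_nil (c : Char) (l : List Char) : pvSplitC c l ≠ [] := by
  induction l with
  | nil => simp [pvSplitC]
  | cons x xs ih =>
    simp only [pvSplitC]
    split_ifs
    · simp
    · intro h
      apply ih
      have hl := congrArg List.length h
      simp only [List.length_modifyHead, List.length_nil] at hl
      exact List.length_eq_zero_iff.mp hl

theorem pvGo_spec (c : Char) (fuel : Nat) (l cur : List Char) (accs : List (List Char))
    (h : l.length ≤ fuel) :
    PySem.Chars.splitOn.go [c] fuel l cur accs =
      accs.reverse ++ (pvSplitC c l).modifyHead (cur.reverse ++ ·) := by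
  induction fuel generalizing l cur accs with
  | zero =>
    have hl : l = [] := List.length_eq_zero_iff.mp (Nat.le_zero.mp h)
    subst hl
    simp [PySem.Chars.splitOn.go, pvSplitC]
  | succ n ih =>
    cases l with
    | nil => simp [PySem.Chars.splitOn.go, pvSplitC]
    | cons x xs =>
      by_cases hx : c = x
      · subst hx
        rw [PySem.Chars.splitOn.go]
        simp only [List.isPrefixOf, BEq.rfl, Bool.true_and, if_true,
          List.length_cons, List.drop_succ_cons, List.length_nil, List.drop_zero]
        rw [ih xs [] (cur.reverse :: accs) (Nat.le_of_succ_le_succ h)]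
        simp [pvSplitC]
        exact congrFun List.modifyHead_id _
      · rw [PySem.Chars.splitOn.go]
        have hpre : [c].isPrefixOf (x :: xs) = false := by
          simp [List.isPrefixOf, hx]
        rw [hpre]
        simp only [Bool.false_eq_true, if_false]
        rw [ih xs (x :: cur) accs (Nat.le_of_succ_le_succ h)]
        have hne := pvSplitC_ne_nil c xs
        obtain ⟨p, ps, hps⟩ := List.exists_cons_of_ne_nil hne
        simp [pvSplitC, Ne.symm hx, hps]

theorem pvSplitOn_eq (c : Char) (l : List Char) :
    PySem.Chars.splitOn l [c] = pvSplitC c l := by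
  rw [PySem.Chars.splitOn, pvGo_spec c (l.length + 1) l [] [] (Nat.le_succ _)]
  simp
  exact congrFun List.modifyHead_id _

theorem pvSplitC_headD (c : Char) (l : List Char) :
    (pvSplitC c l).getD 0 [] = l.takeWhile (· != c) := by
  induction l with
  | nil => simp [pvSplitC]
  | cons x xs ih =>
    simp only [pvSplitC]
    split_ifs with hx
    · subst hx; simp
    · obtain ⟨p, ps, hps⟩ := List.exists_cons_of_ne_nil (pvSplitC_ne_nil c xs)
      rw [hps] at ih ⊢
      simp [hx] at ih ⊢
      exact ih

def pvRest (c : Char) (l : List Char) : List (List Char) :=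
  match l.dropWhile (· != c) with
  | [] => []
  | _ :: r => pvSplitC c r

theorem pvSplitC_cons (c : Char) (l : List Char) :
    pvSplitC c l = l.takeWhile (· != c) :: pvRest c l := by
  induction l with
  | nil => simp [pvSplitC, pvRest]
  | cons x xs ih =>
    simp only [pvSplitC]
    split_ifs with hx
    · subst hx
      simp [pvRest]
    · rw [ih]
      simp [pvRest, hx]

theorem pvDropWhile_seg (cs : List Char) :
    (cs.dropWhile pvSegP).dropWhile (· != '[') = cs.dropWhile (· != '[') := by
  induction cs with
  | nil => simp
  | cons x xs ih =>
    by_cases hx : pvSegP x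
    · have hne : (x != '[') = true := by
        simp [pvSegP] at hx
        simp [hx.2]
      rw [List.dropWhile_cons_of_pos hx, ih]
      simp [hne]
    · rw [List.dropWhile_cons_of_neg hx]

theorem pvDrop_takeWhile (p : Char → Bool) (cs : List Char) :
    cs.drop (cs.takeWhile p).length = cs.dropWhile p := by
  induction cs with
  | nil => simp
  | cons x xs ih =>
    by_cases h : p x <;> simp [h, ih]

theorem pvFindSegs_eq (cs : List Char) :
    pvFindSegs cs = ((pvSplitC '[' cs).tail).map (List.takeWhile (· != '#')) := by
  induction cs using pvFindSegs.induct with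
  | case1 => simp [pvFindSegs, pvSplitC]
  | case2 cs seg ih =>
    have hseg : seg = cs.takeWhile pvSegP := rfl
    rw [hseg] at ih
    rw [pvFindSegs]
    simp only [if_true]
    have hsplit : pvSplitC '[' ('[' :: cs) = [] :: pvSplitC '[' cs := by
      simp [pvSplitC]
    rw [hsplit, List.tail_cons, pvSplitC_cons, List.map_cons]
    refine List.cons_eq_cons.mpr ⟨?_, ?_⟩
    · rw [List.takeWhile_takeWhile]
      congr 1
      funext a
      cases ha : a == '#' <;> cases hb : a == '[' <;> simp [pvSegP, bne, ha, hb]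
    · have hdrop : cs.drop (cs.takeWhile pvSegP).length = cs.dropWhile pvSegP :=
        pvDrop_takeWhile pvSegP cs
      rw [hdrop] at ih ⊢
      rw [ih, pvSplitC_cons]
      have hrest : pvRest '[' (cs.dropWhile pvSegP) = pvRest '[' cs := by
        unfold pvRest
        rw [pvDropWhile_seg]
      simp [hrest]
  | case3 c cs hc ih =>
    rw [pvFindSegs]
    simp only [if_neg hc]
    have hsplit : pvSplitC '[' (c :: cs) = (pvSplitC '[' cs).modifyHead (c :: ·) := by
      simp [pvSplitC, hc]
    rw [hsplit, List.tail_modifyHead, ih]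

theorem pvKey_eq (s : String) : pvKeyA s = pvKeyB s := by
  simp only [pvKeyA, pvKeyB]
  congr 1
  rw [PySem.List.foldl_append_eq_flatMap, List.nil_append, pvSplitOn_eq, pvFindSegs_eq]
  have hgA : ∀ key : List Char,
      '[' :: PySem.List.pyGetD (PySem.Chars.splitOn key ['#']) 0 [] ++ [']'] =
        '[' :: key.takeWhile (· != '#') ++ [']'] := by
    intro key
    rw [pvSplitOn_eq, PySem.List.pyGetD_zero, pvSplitC_headD]
  simp only [List.flatMap_def, List.map_map, Function.comp_def, hgA]

-- ===== VERDICT (by name: the statement is the Claim_ definition above) =====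
theorem key_metadata_key_spec : Claim_equal_key_metadata_key := by
  intro mm _
  unfold Spec_key_metadata_key key_metadata_key key_metadata_key_alt
  rw [PySem.List.foldl_append_singleton_eq_map]
  simp [pvKey_eq]
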